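-- pv_equiv track=rewrite | github.com/FLAIR-THU/VFLAIR | src/evaluates/defenses/defense_functions.py | get_grad_layer_id_by_grad_id
-- ===== SOURCE A (Python) =====
-- def get_grad_layer_id_by_grad_id(num_grad_per_layer, id):
--     id_layer = 0
--     id_temp = id
--     for num_grad_this_layer in num_grad_per_layer:
--         id_temp -= num_grad_this_layer
--         if id_temp >= 0:
--             id_layer += 1
--         else:
--             id_temp += num_grad_this_layer
--             break
--     return id_layer, id_temp
-- ===== SOURCE B (Python) =====
-- def get_grad_layer_id_by_grad_id(num_grad_per_layer, id):
--     # build the prefix-sum table once, then find the first prefix exceeding id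
--     cum = []
--     s = 0
--     for n in num_grad_per_layer:
--         s += n
--         cum.append(s)
--     layer = next((i for i, c in enumerate(cum) if c > id), len(cum))
--     prev = cum[layer - 1] if layer > 0 else 0
--     return layer, id - prev
-- ===== Notes on version B (the rewrite author's own statement) =====
-- stated objective: alternative
-- what changed: Replaces the single-pass running-remainder loop with early break by a prefix-sum table built once, a first-index-exceeding search over it, and one subtraction of the previous prefix to get the offset.
import Mathlib
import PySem

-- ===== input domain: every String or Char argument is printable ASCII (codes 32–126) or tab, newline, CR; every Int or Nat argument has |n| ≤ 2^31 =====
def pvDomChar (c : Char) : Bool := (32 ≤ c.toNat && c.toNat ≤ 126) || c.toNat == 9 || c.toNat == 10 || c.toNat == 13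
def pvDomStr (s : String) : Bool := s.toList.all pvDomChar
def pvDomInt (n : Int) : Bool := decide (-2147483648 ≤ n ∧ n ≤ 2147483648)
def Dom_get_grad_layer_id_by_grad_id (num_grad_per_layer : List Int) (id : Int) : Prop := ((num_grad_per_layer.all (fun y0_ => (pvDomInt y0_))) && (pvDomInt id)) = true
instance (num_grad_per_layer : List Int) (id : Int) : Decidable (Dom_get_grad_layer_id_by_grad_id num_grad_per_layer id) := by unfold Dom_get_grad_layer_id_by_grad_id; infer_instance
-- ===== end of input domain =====

-- B replaces A's running-remainder loop (early break) by a prefix-sum table plus a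
-- first-prefix-exceeding-id search; objective: alternative decomposition, same O(n) cost.

-- ===== PORT A =====
-- the for-loop with early break, state (id_layer, id_temp)
def pvGoA : List Int → Int → Int → Int × Int
  | [], id_layer, id_temp => (id_layer, id_temp)
  | n :: rest, id_layer, id_temp =>
    let t := id_temp - n
    if t ≥ 0 then pvGoA rest (id_layer + 1) t
    else (id_layer, t + n)

def get_grad_layer_id_by_grad_id (num_grad_per_layer : List Int) (id : Int) : Int × Int :=
  pvGoA num_grad_per_layer 0 id

-- ===== PORT B =====
-- prefix sums of the list, starting from accumulator s (Source B's first loop)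
def pvCum : List Int → Int → List Int
  | [], _ => []
  | n :: r, s => (s + n) :: pvCum r (s + n)

-- index of the first element > id, or the length (Source B's next(..., len(cum)))
def pvFindGt : List Int → Int → Nat
  | [], _ => 0
  | c :: r, id => if c > id then 0 else 1 + pvFindGt r id

def get_grad_layer_id_by_grad_id_alt (num_grad_per_layer : List Int) (id : Int) : Int × Int :=
  let cum := pvCum num_grad_per_layer 0
  let layer := pvFindGt cum id
  -- cum[layer-1]: when layer > 0 the index is in range, so getD is exact here
  let prev := if layer > 0 then cum.getD (layer - 1) 0 else 0
  ((layer : Int), id - prev)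

-- ===== PRECONDITION & SPEC =====
def Spec_get_grad_layer_id_by_grad_id (num_grad_per_layer : List Int) (id : Int) (out : Int × Int) : Prop := out = get_grad_layer_id_by_grad_id_alt num_grad_per_layer id
instance (num_grad_per_layer : List Int) (id : Int) (out : Int × Int) : Decidable (Spec_get_grad_layer_id_by_grad_id num_grad_per_layer id out) := by unfold Spec_get_grad_layer_id_by_grad_id; infer_instance

-- ===== CLAIM (what is proved, stated in full; the proofs are below) =====
def Claim_equal_get_grad_layer_id_by_grad_id : Prop := ∀ (num_grad_per_layer : List Int) (id : Int), Dom_get_grad_layer_id_by_grad_id num_grad_per_layer id → Spec_get_grad_layer_id_by_grad_id num_grad_per_layer id (get_grad_layer_id_by_grad_id num_grad_per_layer id)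

-- ===== LEMMAS AND PROOFS =====

-- ===== VERDICT (by name: the statement is the Claim_ definition above) =====
lemma pvCum_length : ∀ (l : List Int) (s : Int), (pvCum l s).length = l.length
  | [], _ => rfl
  | n :: r, s => by simp [pvCum, pvCum_length r]

lemma pvFindGt_le : ∀ (c : List Int) (id : Int), pvFindGt c id ≤ c.length
  | [], _ => Nat.le_refl 0
  | x :: r, id => by
    simp only [pvFindGt]
    split
    · simp
    · have := pvFindGt_le r id
      simp only [List.length_cons]
      omega

lemma pvFindGt_shift : ∀ (l : List Int) (s id : Int),
    pvFindGt (pvCum l s) id = pvFindGt (pvCum l 0) (id - s)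
  | [], _, _ => rfl
  | n :: r, s, id => by
    have h1 := pvFindGt_shift r (s + n) id
    have h2 := pvFindGt_shift r (0 + n) (id - s)
    simp only [pvCum, pvFindGt]
    by_cases h : s + n > id
    · rw [if_pos h, if_pos (by omega : 0 + n > id - s)]
    · rw [if_neg h, if_neg (by omega : ¬ 0 + n > id - s), h1, h2]
      congr 2
      ring

lemma pvCum_getD_shift : ∀ (l : List Int) (s : Int) (j : Nat), j < l.length →
    (pvCum l s).getD j 0 = (pvCum l 0).getD j 0 + s
  | [], _, _, h => by simp at h
  | n :: r, s, 0, _ => by simp [pvCum]; ring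
  | n :: r, s, j + 1, h => by
    simp only [pvCum, List.getD_cons_succ]
    have h1 := pvCum_getD_shift r (s + n) j (by simpa using h)
    have h2 := pvCum_getD_shift r (0 + n) j (by simpa using h)
    rw [h1, h2]; ring

lemma pvGoA_eq : ∀ (l : List Int) (layer temp : Int),
    pvGoA l layer temp =
      (layer + (pvFindGt (pvCum l 0) temp : Int),
       temp - (if pvFindGt (pvCum l 0) temp > 0
               then (pvCum l 0).getD (pvFindGt (pvCum l 0) temp - 1) 0 else 0))
  | [], layer, temp => by simp [pvGoA, pvCum, pvFindGt]
  | n :: r, layer, temp => by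
    simp only [pvGoA, pvCum, pvFindGt]
    have hsh : pvFindGt (pvCum r (0 + n)) temp = pvFindGt (pvCum r 0) (temp - n) := by
      rw [pvFindGt_shift]; congr 1; ring
    by_cases h : temp - n ≥ 0
    · have hn : ¬ (0 + n > temp) := by omega
      rw [if_pos h, pvGoA_eq r (layer + 1) (temp - n)]
      rw [if_neg hn, hsh]
      set k := pvFindGt (pvCum r 0) (temp - n) with hk
      refine Prod.ext ?_ ?_
      · simp; ring
      · simp only
        by_cases hk0 : k > 0
        · have hkl : k - 1 < r.length := by
            have := pvFindGt_le (pvCum r 0) (temp - n)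
            rw [pvCum_length] at this; omega
          have hidx : 1 + k - 1 = (k - 1) + 1 := by omega
          rw [if_pos hk0, if_pos (by omega : 1 + k > 0), hidx, List.getD_cons_succ,
            pvCum_getD_shift r (0 + n) (k - 1) hkl]
          ring
        · have hk0' : k = 0 := by omega
          rw [if_neg hk0, if_pos (by omega : 1 + k > 0)]
          simp [hk0']
    · have hn : (0 + n > temp) := by omega
      rw [if_neg h, if_pos hn]
      refine Prod.ext ?_ ?_
      · simp
      · simp only
        omega

theorem get_grad_layer_id_by_grad_id_spec : Claim_equal_get_grad_layer_id_by_grad_id := by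
  intro l id _
  show get_grad_layer_id_by_grad_id l id = get_grad_layer_id_by_grad_id_alt l id
  simp only [get_grad_layer_id_by_grad_id, get_grad_layer_id_by_grad_id_alt]
  rw [pvGoA_eq]
  simp
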